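-- pv_equiv track=rewrite | github.com/mtalha10/navbar | views/zap.py | categorize_vulnerabilities
-- ===== SOURCE A (Python) =====
-- def categorize_vulnerabilities(alerts):
--     """Advanced vulnerability categorization"""
--     categories = {
--         'Web Security': ['XSS', 'CSRF', 'SQL Injection'],
--         'Configuration': ['HTTP Headers', 'Server Configurations'],
--         'Sensitive Data': ['Information Disclosure', 'Sensitive Content']
--     }
--
--     categorized_alerts = {}
--     for category, patterns in categories.items():
--         categorized_alerts[category] = [
--             alert for alert in alerts
--             if any(pattern in alert['name'] for pattern in patterns)
--         ]
--
--     return categorized_alerts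
-- ===== SOURCE B (Python) =====
-- WEB_PATTERNS = ['XSS', 'CSRF', 'SQL Injection']
-- CONFIG_PATTERNS = ['HTTP Headers', 'Server Configurations']
-- SENSITIVE_PATTERNS = ['Information Disclosure', 'Sensitive Content']
--
--
-- def categorize_vulnerabilities(alerts):
--     """Single accumulating pass: classify each alert into per-category buckets."""
--     web, config, sensitive = [], [], []
--     for alert in alerts:
--         name = alert['name']
--         if any(p in name for p in WEB_PATTERNS):
--             web.append(alert)
--         if any(p in name for p in CONFIG_PATTERNS):
--             config.append(alert)
--         if any(p in name for p in SENSITIVE_PATTERNS):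
--             sensitive.append(alert)
--     return {
--         'Web Security': web,
--         'Configuration': config,
--         'Sensitive Data': sensitive,
--     }
-- ===== Notes on version B (the rewrite author's own statement) =====
-- stated objective: alternative
-- what changed: A builds each category by a separate filtering scan over alerts (category-major, three passes); B makes one alert-major pass that reads each alert's name once and appends the alert to the buckets of every category it matches, assembling the dict at the end.
import Mathlib
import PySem

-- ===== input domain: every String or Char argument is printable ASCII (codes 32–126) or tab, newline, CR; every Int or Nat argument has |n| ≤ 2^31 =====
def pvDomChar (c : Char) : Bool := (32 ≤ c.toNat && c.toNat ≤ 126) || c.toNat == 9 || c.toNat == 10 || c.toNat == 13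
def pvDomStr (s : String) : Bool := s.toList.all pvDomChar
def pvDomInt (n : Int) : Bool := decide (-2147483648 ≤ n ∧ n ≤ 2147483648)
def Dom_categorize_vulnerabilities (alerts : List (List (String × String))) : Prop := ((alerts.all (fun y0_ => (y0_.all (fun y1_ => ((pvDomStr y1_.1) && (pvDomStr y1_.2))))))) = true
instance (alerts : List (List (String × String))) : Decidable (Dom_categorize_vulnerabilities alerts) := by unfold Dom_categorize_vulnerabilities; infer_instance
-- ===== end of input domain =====

-- B is an alternative decomposition: one alert-major pass with three accumulating buckets
-- instead of A's three category-major filtering scans; return values proved equal on Pre_.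

-- ===== PORT A =====
-- alert['name'] (KeyError when absent is excluded by Pre_; default never read there)
def pvName (a : List (String × String)) : String := (PySem.Dict.mk a).getD "name" ""

def categorize_vulnerabilities (alerts : List (List (String × String))) : List (String × List (List (String × String))) :=
  let categories : List (String × List String) :=
    [("Web Security", ["XSS", "CSRF", "SQL Injection"]),
     ("Configuration", ["HTTP Headers", "Server Configurations"]),
     ("Sensitive Data", ["Information Disclosure", "Sensitive Content"])]
  let categorized_alerts :=
    categories.foldl (fun d cp =>
      d.insert cp.1 (alerts.filter (fun alert =>
        cp.2.any (fun pattern => PySem.Str.isIn pattern (pvName alert)))))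
      PySem.Dict.empty
  categorized_alerts.items

-- ===== PORT B =====
def pvWebMatch (a : List (String × String)) : Bool :=
  (["XSS", "CSRF", "SQL Injection"] : List String).any (fun p => PySem.Str.isIn p (pvName a))
def pvConfigMatch (a : List (String × String)) : Bool :=
  (["HTTP Headers", "Server Configurations"] : List String).any (fun p => PySem.Str.isIn p (pvName a))
def pvSensitiveMatch (a : List (String × String)) : Bool :=
  (["Information Disclosure", "Sensitive Content"] : List String).any (fun p => PySem.Str.isIn p (pvName a))

def pvStep (st : List (List (String × String)) × List (List (String × String)) × List (List (String × String)))
    (a : List (String × String)) :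
    List (List (String × String)) × List (List (String × String)) × List (List (String × String)) :=
  (if pvWebMatch a then st.1 ++ [a] else st.1,
   if pvConfigMatch a then st.2.1 ++ [a] else st.2.1,
   if pvSensitiveMatch a then st.2.2 ++ [a] else st.2.2)

def categorize_vulnerabilities_alt (alerts : List (List (String × String))) : List (String × List (List (String × String))) :=
  let st := alerts.foldl pvStep ([], [], [])
  [("Web Security", st.1), ("Configuration", st.2.1), ("Sensitive Data", st.2.2)]

-- ===== PRECONDITION & SPEC =====
-- Pre_: every alert has a 'name' key — A raises KeyError otherwise.
def Pre_categorize_vulnerabilities (alerts : List (List (String × String))) : Prop :=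
  (alerts.all (fun a => (PySem.Dict.mk a).contains "name")) = true
instance (alerts : List (List (String × String))) : Decidable (Pre_categorize_vulnerabilities alerts) := by
  unfold Pre_categorize_vulnerabilities; infer_instance

def pvWitness_categorize_vulnerabilities : (List (List (String × String))) :=
  [[("name", "XSS attack")], [("name", "benign")]]

def Spec_categorize_vulnerabilities (alerts : List (List (String × String))) (out : List (String × List (List (String × String)))) : Prop := out = categorize_vulnerabilities_alt alerts
instance (alerts : List (List (String × String))) (out : List (String × List (List (String × String)))) : Decidable (Spec_categorize_vulnerabilities alerts out) := by unfold Spec_categorize_vulnerabilities; infer_instance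

-- ===== CLAIM (what is proved, stated in full; the proofs are below) =====
def Claim_equal_categorize_vulnerabilities : Prop := ∀ (alerts : List (List (String × String))), Dom_categorize_vulnerabilities alerts → Pre_categorize_vulnerabilities alerts → Spec_categorize_vulnerabilities alerts (categorize_vulnerabilities alerts)

-- ===== LEMMAS AND PROOFS =====
lemma pvFoldl_pvStep (as : List (List (String × String)))
    (w c s : List (List (String × String))) :
    as.foldl pvStep (w, c, s) =
      (w ++ as.filter pvWebMatch, c ++ as.filter pvConfigMatch, s ++ as.filter pvSensitiveMatch) := by
  induction as generalizing w c s with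
  | nil => simp
  | cons a t ih =>
    simp only [List.foldl_cons, pvStep, List.filter_cons]
    rw [ih]
    split_ifs <;> simp

lemma pvA_eq (alerts : List (List (String × String))) :
    categorize_vulnerabilities alerts =
      [("Web Security", alerts.filter pvWebMatch),
       ("Configuration", alerts.filter pvConfigMatch),
       ("Sensitive Data", alerts.filter pvSensitiveMatch)] := by
  simp [categorize_vulnerabilities, PySem.Dict.insert, PySem.Dict.empty, PySem.Dict.contains]
  refine ⟨?_, ?_, ?_⟩ <;>
    · apply List.filter_congr
      intro a _
      simp [pvWebMatch, pvConfigMatch, pvSensitiveMatch]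

-- ===== VERDICT (by name: the statement is the Claim_ definition above) =====
theorem categorize_vulnerabilities_spec : Claim_equal_categorize_vulnerabilities := by
  intro alerts _ _
  unfold Spec_categorize_vulnerabilities
  rw [pvA_eq, categorize_vulnerabilities_alt]
  simp [pvFoldl_pvStep]
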